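-- pv_equiv track=rewrite | github.com/cristhianparedes0924-web/ssga-meta-labeling | primary_model/src/primary_model/data_contract.py | resolve_required_columns
-- ===== SOURCE A (Python) =====
-- from typing import Iterable
--
-- RAW_REQUIRED_COLUMNS = ["Date", "PX_LAST", "CHG_PCT_1D"]
--
-- def _normalize_column_name(value: object) -> str:
--     return str(value).strip().upper()
--
-- def find_column(columns: Iterable[object], target: str) -> str | None:
--     """Return the original column name matching target (case/whitespace-insensitive)."""
--     target_norm = _normalize_column_name(target)
--     for col in columns:
--         if _normalize_column_name(col) == target_norm:
--             return str(col)
--     return None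
--
-- def resolve_required_columns(columns: Iterable[object]) -> dict[str, str]:
--     """Map required raw columns to actual file column names."""
--     mapping: dict[str, str] = {}
--     missing: list[str] = []
--
--     for required in RAW_REQUIRED_COLUMNS:
--         match = find_column(columns, required)
--         if match is None:
--             missing.append(required)
--         else:
--             mapping[required] = match
--
--     if missing:
--         raise ValueError(f"Missing required raw columns: {missing}")
--     return mapping
-- ===== SOURCE B (Python) =====
-- RAW_REQUIRED_COLUMNS = ["Date", "PX_LAST", "CHG_PCT_1D"]
--
-- def _normalize_column_name(value: object) -> str:
--     return str(value).strip().upper()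
--
-- def resolve_required_columns(columns):
--     """Map required raw columns to actual file column names (single-pass index)."""
--     index = {}
--     for col in columns:
--         norm = _normalize_column_name(col)
--         if norm not in index:
--             index[norm] = str(col)
--
--     mapping = {}
--     missing = []
--     for required in RAW_REQUIRED_COLUMNS:
--         match = index.get(_normalize_column_name(required))
--         if match is None:
--             missing.append(required)
--         else:
--             mapping[required] = match
--
--     if missing:
--         raise ValueError(f"Missing required raw columns: {missing}")
--     return mapping
-- ===== Notes on version B (the rewrite author's own statement) =====
-- stated objective: faster
-- what changed: Instead of rescanning the whole column list once per required name, B builds a normalized-name -> original-name dict in one pass (first occurrence wins) and resolves each required name by a constant-time lookup.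
import Mathlib
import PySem

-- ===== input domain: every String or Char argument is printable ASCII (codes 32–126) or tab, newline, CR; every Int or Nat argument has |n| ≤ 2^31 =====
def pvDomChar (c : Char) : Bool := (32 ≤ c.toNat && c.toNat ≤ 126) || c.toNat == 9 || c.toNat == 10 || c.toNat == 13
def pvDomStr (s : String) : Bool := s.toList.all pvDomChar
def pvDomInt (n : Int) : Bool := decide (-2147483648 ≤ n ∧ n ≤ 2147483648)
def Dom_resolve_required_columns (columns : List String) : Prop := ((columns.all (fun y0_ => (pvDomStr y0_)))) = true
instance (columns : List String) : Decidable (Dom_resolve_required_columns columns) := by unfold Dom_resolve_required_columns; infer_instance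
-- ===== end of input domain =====

-- B replaces A's per-required-name rescans of `columns` with a single pass building a
-- normalized-name index dict, then constant-time lookups (objective: faster, constant factor).


-- ===== PORT A =====
-- RAW_REQUIRED_COLUMNS
def rawRequiredColumns : List String := ["Date", "PX_LAST", "CHG_PCT_1D"]

-- _normalize_column_name(value) = str(value).strip().upper()  (shared helper of both modules)
def normColName (s : String) : String := PySem.Str.upper (PySem.Str.strip s)

-- the 'for col in columns' scan of find_column, with target_norm already computed
def findColAux (tn : String) : List String → Option String
  | [] => none
  | c :: rest => if normColName c == tn then some c else findColAux tn rest

def find_column (columns : List String) (target : String) : Option String :=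
  findColAux (normColName target) columns

-- the ValueError on non-empty `missing` is excluded by Pre_; the port returns the mapping's items
def resolve_required_columns (columns : List String) : List (String × String) :=
  (rawRequiredColumns.foldl
    (fun (st : PySem.Dict String String × List String) required =>
      match find_column columns required with
      | none => (st.1, st.2 ++ [required])
      | some m => (st.1.insert required m, st.2))
    (PySem.Dict.empty, [])).1.items

-- ===== PORT B =====
-- one pass over columns: index[norm] = col for the FIRST col with that normalized name
def buildIndex (columns : List String) : PySem.Dict String String :=
  columns.foldl
    (fun d c =>
      let n := normColName c
      if d.contains n then d else d.insert n c)
    PySem.Dict.empty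

-- the ValueError on non-empty `missing` is excluded by Pre_; the port returns the mapping's items
def resolve_required_columns_alt (columns : List String) : List (String × String) :=
  (rawRequiredColumns.foldl
    (fun (st : PySem.Dict String String × List String) required =>
      match (buildIndex columns).get? (normColName required) with
      | none => (st.1, st.2 ++ [required])
      | some m => (st.1.insert required m, st.2))
    (PySem.Dict.empty, [])).1.items

-- ===== PRECONDITION & SPEC =====
-- Pre_ excludes exactly the inputs where `missing` is non-empty, on which the Python A
-- (and B alike) raises ValueError: every required name must have a normalized match.
def Pre_resolve_required_columns (columns : List String) : Prop :=
  (rawRequiredColumns.all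
    (fun t => columns.any (fun c => normColName c == normColName t))) = true
instance (columns : List String) : Decidable (Pre_resolve_required_columns columns) := by
  unfold Pre_resolve_required_columns; infer_instance

def pvWitness_resolve_required_columns : List String := ["  date ", "px_last", "CHG_PCT_1D", "Extra"]

def Spec_resolve_required_columns (columns : List String) (out : List (String × String)) : Prop := out = resolve_required_columns_alt columns
instance (columns : List String) (out : List (String × String)) : Decidable (Spec_resolve_required_columns columns out) := by unfold Spec_resolve_required_columns; infer_instance

-- ===== CLAIM (what is proved, stated in full; the proofs are below) =====
def Claim_equal_resolve_required_columns : Prop := ∀ (columns : List String), Dom_resolve_required_columns columns → Pre_resolve_required_columns columns → Spec_resolve_required_columns columns (resolve_required_columns columns)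

-- ===== LEMMAS AND PROOFS =====

-- the index built in one pass answers exactly what A's linear scan answers
theorem get_buildIndexAux (t : String) (columns : List String) :
    ∀ d : PySem.Dict String String,
      (columns.foldl
        (fun d c =>
          let n := normColName c
          if d.contains n then d else d.insert n c) d).get? t
      = (d.get? t).or (findColAux t columns) := by
  induction columns with
  | nil => intro d; simp [findColAux]
  | cons c rest ih =>
    intro d
    simp only [List.foldl_cons, ih, findColAux]
    by_cases hn : normColName c = t
    · subst hn
      by_cases hc : d.contains (normColName c) = true
      · have hs : (d.get? (normColName c)).isSome := by
          rw [PySem.Dict.contains_eq_isSome_get?] at hc; exact hc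
        obtain ⟨v, hv⟩ := Option.isSome_iff_exists.mp hs
        simp [hc, hv]
      · have hnone : d.get? (normColName c) = none :=
          (PySem.Dict.get?_eq_none_iff_contains d _).mpr (by simpa using hc)
        simp [hc, hnone, PySem.Dict.get?_insert_self]
    · have hb : (normColName c == t) = false := by simpa using hn
      by_cases hc : d.contains (normColName c) = true
      · simp [hc, hb]
      · simp [hc, hb, PySem.Dict.get?_insert_of_ne _ _ (Ne.symm hn)]

theorem get_buildIndex (columns : List String) (r : String) :
    (buildIndex columns).get? (normColName r) = find_column columns r := by
  unfold buildIndex find_column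
  rw [get_buildIndexAux]
  simp

-- ===== VERDICT (by name: the statement is the Claim_ definition above) =====
theorem resolve_required_columns_spec : Claim_equal_resolve_required_columns := by
  intro columns _ _
  unfold Spec_resolve_required_columns resolve_required_columns resolve_required_columns_alt
  simp only [get_buildIndex]
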